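-- pv_equiv track=rewrite | github.com/AyoubSelmi/multipleface_lipsync | utils.py | find_ordered_sequences_with_status
-- ===== SOURCE A (Python) =====
-- def find_ordered_sequences_with_status(all_frames, asd_output_frames):
--     missing = sorted(set(all_frames) - set(asd_output_frames))      # Find missing values
--     non_missing = sorted(set(asd_output_frames))              # Sort the non-missing values
--     all_sequences = []
--
--     # Helper function to extract sequences
--     def extract_sequences(values):
--         sequences = []
--         current_sequence = []
--
--         for i in range(len(values)):
--             # If it's the first element or it's consecutive to the previous element
--             if i == 0 or values[i] == values[i-1] + 1:
--                 current_sequence.append(values[i])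
--             else:
--                 # If not consecutive, store the current sequence and start a new one
--                 sequences.append(current_sequence)
--                 current_sequence = [values[i]]
--
--         if current_sequence:  # Append the last sequence
--             sequences.append(current_sequence)
--
--         return sequences
--
--     # Get missing and non-missing sequences
--     missing_sequences = extract_sequences(missing)
--     non_missing_sequences = extract_sequences(non_missing)
--
--     # Pointers for iterating through missing and non-missing sequences
--     i, j = 0, 0
--
--     # Traverse through full and append either missing or non-missing sequences in order
--     while i < len(missing_sequences) or j < len(non_missing_sequences):
--         if j < len(non_missing_sequences) and (i == len(missing_sequences) or non_missing_sequences[j][0] < missing_sequences[i][0]):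
--             all_sequences.append((non_missing_sequences[j], True))  # sequence contain a face
--             j += 1
--         else:
--             all_sequences.append((missing_sequences[i], False))  #  if missing this means it does not contain a face
--             i += 1
--
--     return all_sequences
-- ===== SOURCE B (Python) =====
-- def find_ordered_sequences_with_status(all_frames, asd_output_frames):
--     # Single pass over the sorted universe of frames, splitting runs on
--     # value gaps or status changes.
--     asd = set(asd_output_frames)
--     universe = sorted(set(all_frames) | asd)
--     result = []
--     cur = []
--     cur_status = False
--     for v in universe:
--         st = v in asd
--         if cur and v == cur[-1] + 1 and st == cur_status:
--             cur.append(v)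
--         else:
--             if cur:
--                 result.append((cur, cur_status))
--             cur = [v]
--             cur_status = st
--     if cur:
--         result.append((cur, cur_status))
--     return result
-- ===== Notes on version B (the rewrite author's own statement) =====
-- stated objective: simpler
-- what changed: B replaces A's three-phase pipeline (extract consecutive runs of the missing set, extract runs of the asd set, then a two-pointer merge by run start) with one pass over the single sorted universe set(all_frames)|set(asd_output_frames) that starts a new run whenever the value is not prev+1 or its membership status in the asd set changes.
import Mathlib
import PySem

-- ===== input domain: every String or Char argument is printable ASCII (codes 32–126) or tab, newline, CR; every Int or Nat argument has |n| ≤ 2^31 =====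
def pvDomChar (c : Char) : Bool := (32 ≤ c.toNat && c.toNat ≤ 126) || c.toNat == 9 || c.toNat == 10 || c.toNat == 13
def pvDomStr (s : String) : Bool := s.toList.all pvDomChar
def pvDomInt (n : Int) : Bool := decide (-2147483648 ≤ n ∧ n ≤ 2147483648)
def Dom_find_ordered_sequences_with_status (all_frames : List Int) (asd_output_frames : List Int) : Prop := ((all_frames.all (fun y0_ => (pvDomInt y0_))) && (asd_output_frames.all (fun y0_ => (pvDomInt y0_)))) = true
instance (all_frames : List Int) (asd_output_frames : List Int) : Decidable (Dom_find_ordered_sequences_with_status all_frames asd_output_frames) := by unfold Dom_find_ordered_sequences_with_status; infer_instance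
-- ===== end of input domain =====

-- B groups the sorted univrs of frames in ONE pass (breaking runs on gaps or status changes)
-- instead of A's extract-twice-then-merge; objective: simpler decomposition, same asymptotic cost.


-- ===== PORT A =====
-- one loop step of extract_sequences: state = (sequences, current_sequence), index i
def pvExtractStep (values : List Int) (st : List (List Int) × List Int) (i : Int) : List (List Int) × List Int :=
  if i = 0 ∨ PySem.List.pyGetD values i 0 = PySem.List.pyGetD values (i - 1) 0 + 1 then
    -- indices produced by range(len(values)) are always in range, so values[i] never raises
    (st.1, st.2 ++ [PySem.List.pyGetD values i 0])
  else
    (st.1 ++ [st.2], [PySem.List.pyGetD values i 0])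

-- extract_sequences(values)
def pvExtract (values : List Int) : List (List Int) :=
  let st := (PySem.List.pyRange 0 (values.length : Int) 1).foldl (pvExtractStep values) ([], [])
  if st.2 ≠ [] then st.1 ++ [st.2] else st.1

-- the two-pointer while loop, indices i/j rendered as the remaining suffixes;
-- sequences are nonempty by construction, so seq[0] (here .headD 0) never raises
def pvMergeA : List (List Int) → List (List Int) → List (List Int × Bool)
  | [], [] => []
  | [], n :: ns => (n, true) :: pvMergeA [] ns
  | m :: ms, [] => (m, false) :: pvMergeA ms []
  | m :: ms, n :: ns =>
    if n.headD 0 < m.headD 0 then (n, true) :: pvMergeA (m :: ms) ns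
    else (m, false) :: pvMergeA ms (n :: ns)
  termination_by ms ns => ms.length + ns.length

def find_ordered_sequences_with_status (all_frames : List Int) (asd_output_frames : List Int) : List (List Int × Bool) :=
  let missing := PySem.List.sorted (PySem.Set.diff (PySem.Set.ofList all_frames) (PySem.Set.ofList asd_output_frames)) (fun x => x) false
  let non_missing := PySem.List.sorted (PySem.Set.ofList asd_output_frames) (fun x => x) false
  pvMergeA (pvExtract missing) (pvExtract non_missing)

-- ===== PORT B =====
-- one loop step: state = (result, cur, cur_status); cur[-1] is .getLastD 0 (cur is nonempty when read)
def pvBStep (asd : PySem.Set Int) (st : List (List Int × Bool) × List Int × Bool) (v : Int) :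
    List (List Int × Bool) × List Int × Bool :=
  let s := PySem.Set.contains asd v
  if st.2.1 ≠ [] ∧ v = st.2.1.getLastD 0 + 1 ∧ s = st.2.2 then
    (st.1, st.2.1 ++ [v], st.2.2)
  else
    ((if st.2.1 ≠ [] then st.1 ++ [(st.2.1, st.2.2)] else st.1), [v], s)

def find_ordered_sequences_with_status_alt (all_frames : List Int) (asd_output_frames : List Int) : List (List Int × Bool) :=
  let asd := PySem.Set.ofList asd_output_frames
  let univrs := PySem.List.sorted (PySem.Set.union (PySem.Set.ofList all_frames) asd) (fun x => x) false
  let st := univrs.foldl (pvBStep asd) ([], [], false)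
  if st.2.1 ≠ [] then st.1 ++ [(st.2.1, st.2.2)] else st.1

-- ===== PRECONDITION & SPEC =====
def Spec_find_ordered_sequences_with_status (all_frames : List Int) (asd_output_frames : List Int) (out : List (List Int × Bool)) : Prop := out = find_ordered_sequences_with_status_alt all_frames asd_output_frames
instance (all_frames : List Int) (asd_output_frames : List Int) (out : List (List Int × Bool)) : Decidable (Spec_find_ordered_sequences_with_status all_frames asd_output_frames out) := by unfold Spec_find_ordered_sequences_with_status; infer_instance

-- ===== CLAIM (what is proved, stated in full; the proofs are below) =====
def Claim_equal_find_ordered_sequences_with_status : Prop := ∀ (all_frames : List Int) (asd_output_frames : List Int), Dom_find_ordered_sequences_with_status all_frames asd_output_frames → Spec_find_ordered_sequences_with_status all_frames asd_output_frames (find_ordered_sequences_with_status all_frames asd_output_frames)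

-- ===== LEMMAS AND PROOFS =====

-- canonical "status runs": longest prefix consecutive to prev with status b
def pvTakeRun (p : Int → Bool) (b : Bool) (prev : Int) : List Int → List Int × List Int
  | [] => ([], [])
  | y :: ys =>
    if y = prev + 1 ∧ p y = b then
      let r := pvTakeRun p b y ys
      (y :: r.1, r.2)
    else ([], y :: ys)

theorem pvTakeRun_len (p : Int → Bool) (b : Bool) : ∀ (l : List Int) (prev : Int),
    (pvTakeRun p b prev l).2.length ≤ l.length := by
  intro l
  induction l with
  | nil => intro prev; simp [pvTakeRun]
  | cons y ys ih =>
    intro prev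
    simp only [pvTakeRun]
    split
    · exact le_trans (ih y) (Nat.le_succ _)
    · simp

def pvRuns (p : Int → Bool) : List Int → List (List Int × Bool)
  | [] => []
  | x :: xs =>
    (x :: (pvTakeRun p (p x) x xs).1, p x) :: pvRuns p (pvTakeRun p (p x) x xs).2
  termination_by l => l.length
  decreasing_by
    exact Nat.lt_succ_of_le (pvTakeRun_len p (p x) xs x)

-- consecutive runs, no status (what extract_sequences computes)
def pvTakeC (prev : Int) : List Int → List Int × List Int
  | [] => ([], [])
  | y :: ys =>
    if y = prev + 1 then
      let r := pvTakeC y ys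
      (y :: r.1, r.2)
    else ([], y :: ys)

theorem pvTakeC_len : ∀ (l : List Int) (prev : Int), (pvTakeC prev l).2.length ≤ l.length := by
  intro l
  induction l with
  | nil => intro prev; simp [pvTakeC]
  | cons y ys ih =>
    intro prev
    simp only [pvTakeC]
    split
    · exact le_trans (ih y) (Nat.le_succ _)
    · simp

def pvRunsC : List Int → List (List Int)
  | [] => []
  | x :: xs => (x :: (pvTakeC x xs).1) :: pvRunsC (pvTakeC x xs).2
  termination_by l => l.length
  decreasing_by
    exact Nat.lt_succ_of_le (pvTakeC_len xs x)

-- the tail of extract's loop, with prev and a nonempty current run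
def pvRunsFrom (prev : Int) (cur : List Int) : List Int → List (List Int)
  | [] => [cur]
  | y :: ys => if y = prev + 1 then pvRunsFrom y (cur ++ [y]) ys else cur :: pvRunsFrom y [y] ys

theorem pvRunsFrom_eq (l : List Int) : ∀ (prev : Int) (cur : List Int),
    pvRunsFrom prev cur l = (cur ++ (pvTakeC prev l).1) :: pvRunsC (pvTakeC prev l).2 := by
  induction l with
  | nil => intro prev cur; simp [pvRunsFrom, pvTakeC, pvRunsC]
  | cons y ys ih =>
    intro prev cur
    simp only [pvRunsFrom, pvTakeC]
    split
    · rw [ih y (cur ++ [y])]; simp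
    · rw [ih y [y]]
      simp [pvRunsC]

theorem pvExtract_loop (values : List Int) : ∀ (k : Nat), 1 ≤ k → k ≤ values.length →
    ∀ (seqs : List (List Int)) (cur : List Int), cur ≠ [] →
    (if ((PySem.List.pyRange (k : Int) (values.length : Int) 1).foldl (pvExtractStep values) (seqs, cur)).2 ≠ []
     then ((PySem.List.pyRange (k : Int) (values.length : Int) 1).foldl (pvExtractStep values) (seqs, cur)).1
            ++ [((PySem.List.pyRange (k : Int) (values.length : Int) 1).foldl (pvExtractStep values) (seqs, cur)).2]
     else ((PySem.List.pyRange (k : Int) (values.length : Int) 1).foldl (pvExtractStep values) (seqs, cur)).1)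
    = seqs ++ pvRunsFrom (values.getD (k - 1) 0) cur (values.drop k) := by
  suffices h : ∀ (d k : Nat), values.length - k = d → 1 ≤ k → k ≤ values.length →
      ∀ (seqs : List (List Int)) (cur : List Int), cur ≠ [] →
      (if ((PySem.List.pyRange (k : Int) (values.length : Int) 1).foldl (pvExtractStep values) (seqs, cur)).2 ≠ []
       then ((PySem.List.pyRange (k : Int) (values.length : Int) 1).foldl (pvExtractStep values) (seqs, cur)).1
              ++ [((PySem.List.pyRange (k : Int) (values.length : Int) 1).foldl (pvExtractStep values) (seqs, cur)).2]
       else ((PySem.List.pyRange (k : Int) (values.length : Int) 1).foldl (pvExtractStep values) (seqs, cur)).1)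
      = seqs ++ pvRunsFrom (values.getD (k - 1) 0) cur (values.drop k) by
    intro k hk1 hk2 seqs cur hcur
    exact h (values.length - k) k rfl hk1 hk2 seqs cur hcur
  intro d
  induction d with
  | zero =>
    intro k hd hk1 hk2 seqs cur hcur
    have hk : k = values.length := by omega
    subst hk
    rw [PySem.List.pyRange_one_eq_nil (le_refl _)]
    simp only [List.foldl_nil, List.drop_length, pvRunsFrom]
    simp [hcur]
  | succ d ih =>
    intro k hd hk1 hk2 seqs cur hcur
    have hklt : k < values.length := by omega
    have hki : (k : Int) < (values.length : Int) := by exact_mod_cast hklt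
    rw [PySem.List.pyRange_one_cons hki]
    have hcast : (k : Int) + 1 = ((k + 1 : Nat) : Int) := by push_cast; ring
    have hget : PySem.List.pyGetD values (k : Int) 0 = values[k] := by
      rw [PySem.List.pyGetD_natCast]; exact List.getD_eq_getElem values 0 hklt
    have hget' : PySem.List.pyGetD values ((k : Int) - 1) 0 = values.getD (k - 1) 0 := by
      have : (k : Int) - 1 = ((k - 1 : Nat) : Int) := by omega
      rw [this, PySem.List.pyGetD_natCast]
    have hk0 : ¬((k : Int) = 0) := by omega
    have hdrop : values.drop k = values[k] :: values.drop (k + 1) := List.drop_eq_getElem_cons hklt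
    by_cases hc : values[k] = values.getD (k - 1) 0 + 1
    · have hstep : pvExtractStep values (seqs, cur) (k : Int) = (seqs, cur ++ [values[k]]) := by
        simp only [pvExtractStep, hget, hget']
        rw [if_pos (Or.inr hc)]
      rw [List.foldl_cons, hstep, hcast]
      rw [ih (k + 1) (by omega) (by omega) (by omega) seqs (cur ++ [values[k]]) (by simp)]
      rw [hdrop]
      simp only [pvRunsFrom, if_pos hc, Nat.add_sub_cancel]
      rw [List.getD_eq_getElem values 0 hklt]
    · have hstep : pvExtractStep values (seqs, cur) (k : Int) = (seqs ++ [cur], [values[k]]) := by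
        simp only [pvExtractStep, hget, hget']
        rw [if_neg (by
          simp only [not_or]
          exact ⟨by omega, by simpa [List.getD] using hc⟩)]
      rw [List.foldl_cons, hstep, hcast]
      rw [ih (k + 1) (by omega) (by omega) (by omega) (seqs ++ [cur]) [values[k]] (by simp)]
      rw [hdrop]
      simp only [pvRunsFrom, if_neg hc, Nat.add_sub_cancel]
      rw [List.getD_eq_getElem values 0 hklt, List.append_assoc]
      rfl

theorem pvExtract_eq_runsC (values : List Int) : pvExtract values = pvRunsC values := by
  cases values with
  | nil => simp [pvExtract, pvRunsC, PySem.List.pyRange_one_eq_nil]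
  | cons v vs =>
    unfold pvExtract
    have hlen : 0 < (v :: vs).length := by simp
    have h0 : ((0 : Nat) : Int) < ((v :: vs).length : Int) := by exact_mod_cast hlen
    rw [show ((0 : Int)) = ((0 : Nat) : Int) from rfl, PySem.List.pyRange_one_cons h0]
    have hget : PySem.List.pyGetD (v :: vs) ((0 : Nat) : Int) 0 = v := by
      rw [PySem.List.pyGetD_natCast]; rfl
    rw [List.foldl_cons]
    have hstep : pvExtractStep (v :: vs) ([], []) ((0 : Nat) : Int) = ([], [v]) := by
      simp only [pvExtractStep, hget]
      rw [if_pos (Or.inl (by norm_num))]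
      rfl
    rw [hstep, show ((0 : Nat) : Int) + 1 = ((1 : Nat) : Int) from by norm_num]
    rw [pvExtract_loop (v :: vs) 1 (le_refl _) (by simp) [] [v] (by simp)]
    simp only [List.nil_append, List.drop_one, List.tail_cons]
    rw [pvRunsFrom_eq]
    simp [pvRunsC]

-- B's fold computes pvRuns
theorem pvB_loop (asd : PySem.Set Int) (xs : List Int) : ∀ (res : List (List Int × Bool)) (cur : List Int) (b : Bool),
    cur ≠ [] →
    (if (xs.foldl (pvBStep asd) (res, cur, b)).2.1 ≠ []
     then (xs.foldl (pvBStep asd) (res, cur, b)).1 ++ [((xs.foldl (pvBStep asd) (res, cur, b)).2.1, (xs.foldl (pvBStep asd) (res, cur, b)).2.2)]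
     else (xs.foldl (pvBStep asd) (res, cur, b)).1)
    = res ++ (cur ++ (pvTakeRun (fun v => PySem.Set.contains asd v) b (cur.getLastD 0) xs).1, b)
        :: pvRuns (fun v => PySem.Set.contains asd v) (pvTakeRun (fun v => PySem.Set.contains asd v) b (cur.getLastD 0) xs).2 := by
  induction xs with
  | nil =>
    intro res cur b hcur
    simp [pvTakeRun, pvRuns, hcur]
  | cons v vs ih =>
    intro res cur b hcur
    by_cases hc : v = cur.getLastD 0 + 1 ∧ PySem.Set.contains asd v = b
    · have hstep : pvBStep asd (res, cur, b) v = (res, cur ++ [v], b) := by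
        simp only [pvBStep]
        rw [if_pos ⟨hcur, hc.1, hc.2⟩]
      rw [List.foldl_cons, hstep, ih res (cur ++ [v]) b (by simp)]
      simp only [List.getLastD_concat, pvTakeRun]
      rw [if_pos hc]
      simp
    · have hstep : pvBStep asd (res, cur, b) v = (res ++ [(cur, b)], [v], PySem.Set.contains asd v) := by
        simp only [pvBStep]
        rw [if_neg (by tauto), if_pos hcur]
      rw [List.foldl_cons, hstep, ih (res ++ [(cur, b)]) [v] _ (by simp)]
      simp only [pvTakeRun]
      rw [if_neg hc]
      simp [pvRuns]

theorem pvB_eq_runs (asd : PySem.Set Int) (xs : List Int) :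
    (if (xs.foldl (pvBStep asd) ([], [], false)).2.1 ≠ []
     then (xs.foldl (pvBStep asd) ([], [], false)).1 ++ [((xs.foldl (pvBStep asd) ([], [], false)).2.1, (xs.foldl (pvBStep asd) ([], [], false)).2.2)]
     else (xs.foldl (pvBStep asd) ([], [], false)).1)
    = pvRuns (fun v => PySem.Set.contains asd v) xs := by
  cases xs with
  | nil => simp [pvRuns]
  | cons v vs =>
    have hstep : pvBStep asd ([], [], false) v = ([], [v], PySem.Set.contains asd v) := by
      simp [pvBStep]
    rw [List.foldl_cons, hstep, pvB_loop asd vs [] [v] _ (by simp)]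
    simp [pvRuns]

theorem pvTakeRun_append (p : Int → Bool) (b : Bool) : ∀ (l : List Int) (prev : Int),
    (pvTakeRun p b prev l).1 ++ (pvTakeRun p b prev l).2 = l := by
  intro l
  induction l with
  | nil => intro prev; simp [pvTakeRun]
  | cons y ys ih =>
    intro prev
    simp only [pvTakeRun]
    split
    · simpa using ih y
    · simp

theorem pvTakeRun_mem (p : Int → Bool) (b : Bool) : ∀ (l : List Int) (prev : Int) (x : Int),
    x ∈ (pvTakeRun p b prev l).1 → p x = b := by
  intro l
  induction l with
  | nil => intro prev x hx; simp [pvTakeRun] at hx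
  | cons y ys ih =>
    intro prev x hx
    simp only [pvTakeRun] at hx
    split at hx
    · rename_i hcond
      simp only [List.mem_cons] at hx
      rcases hx with rfl | hx
      · exact hcond.2
      · exact ih y x hx
    · simp at hx

theorem pvTakeRun_stop (p : Int → Bool) (b : Bool) : ∀ (l : List Int) (prev : Int),
    (pvTakeRun p b prev l).2 = [] ∨
    ∃ h t, (pvTakeRun p b prev l).2 = h :: t ∧
      ¬(h = (pvTakeRun p b prev l).1.getLastD prev + 1 ∧ p h = b) := by
  intro l
  induction l with
  | nil => intro prev; left; simp [pvTakeRun]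
  | cons y ys ih =>
    intro prev
    simp only [pvTakeRun]
    by_cases hc : y = prev + 1 ∧ p y = b
    · rw [if_pos hc]
      rcases ih y with h1 | ⟨h, t, h2, h3⟩
      · left; simpa using h1
      · right
        refine ⟨h, t, by simpa using h2, ?_⟩
        simpa [← List.getLastD_eq_getLast?, List.getLastD_cons] using h3
    · rw [if_neg hc]
      right
      exact ⟨y, ys, rfl, by simpa using hc⟩

theorem pvTakeC_run_append (p : Int → Bool) (b : Bool) : ∀ (l : List Int) (prev : Int) (t : List Int),
    (∀ h ∈ t.head?, h ≠ (pvTakeRun p b prev l).1.getLastD prev + 1) →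
    pvTakeC prev ((pvTakeRun p b prev l).1 ++ t) = ((pvTakeRun p b prev l).1, t) := by
  intro l
  induction l with
  | nil =>
    intro prev t ht
    simp only [pvTakeRun, List.nil_append]
    cases t with
    | nil => simp [pvTakeC]
    | cons h t' =>
      have := ht h (by simp)
      simp only [pvTakeC]
      rw [if_neg (by simpa using this)]
  | cons y ys ih =>
    intro prev t ht
    simp only [pvTakeRun]
    by_cases hc : y = prev + 1 ∧ p y = b
    · simp only [if_pos hc]
      simp only [List.cons_append, pvTakeC]
      rw [if_pos hc.1]
      have := ih y t (by
        intro h hh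
        have := ht h hh
        simpa [pvTakeRun, if_pos hc, ← List.getLastD_eq_getLast?, List.getLastD_cons] using this)
      simp [this]
    · simp only [if_neg hc, List.nil_append]
      cases t with
      | nil => simp [pvTakeC]
      | cons h t' =>
        have := ht h (by simp)
        simp only [pvTakeC]
        rw [if_neg (by simpa [pvTakeRun, if_neg hc] using this)]

theorem pvGetLastD_mem_cons (l : List Int) (d : Int) : l.getLastD d ∈ d :: l := by
  induction l generalizing d with
  | nil => simp
  | cons y ys ih =>
    rcases (List.mem_cons.mp (ih y)) with h | h
    · rw [List.getLastD_cons, h]; simp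
    · rw [List.getLastD_cons]
      exact List.mem_cons_of_mem _ (List.mem_cons_of_mem _ h)

-- merge of the per-status runs = the status runs of the whole sorted list
theorem pvMerge_eq_runs (p : Int → Bool) (S : List Int) (hS : S.Pairwise (· < ·)) :
    pvMergeA (pvRunsC (S.filter (fun v => !(p v)))) (pvRunsC (S.filter p)) = pvRuns p S := by
  suffices H : ∀ (n : Nat) (S : List Int), S.length ≤ n → S.Pairwise (· < ·) →
      pvMergeA (pvRunsC (S.filter (fun v => !(p v)))) (pvRunsC (S.filter p)) = pvRuns p S from
    H S.length S (le_refl _) hS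
  intro n
  induction n with
  | zero =>
    intro S hlen _
    have : S = [] := List.eq_nil_of_length_eq_zero (by omega)
    subst this
    simp [pvRunsC, pvMergeA, pvRuns]
  | succ n ih =>
    intro S hlen hS
    cases S with
    | nil => simp [pvRunsC, pvMergeA, pvRuns]
    | cons x xs =>
      -- analyse the first status run, by the status of x
      cases hpx : p x with
      | true =>
        set r := pvTakeRun p true x xs with hr
        have hsplit : r.1 ++ r.2 = xs := pvTakeRun_append p true xs x
        have hmem : ∀ z ∈ r.1, p z = true := fun z hz => pvTakeRun_mem p true xs x z hz
        have hS' : ((x :: r.1) ++ r.2).Pairwise (· < ·) := by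
          rw [List.cons_append, hsplit]; exact hS
        have hcross : ∀ a ∈ x :: r.1, ∀ z ∈ r.2, a < z := (List.pairwise_append.mp hS').2.2
        have hr2 : r.2.Pairwise (· < ·) := (List.pairwise_append.mp hS').2.1
        have hgt : ∀ z ∈ r.2, r.1.getLastD x < z :=
          fun z hz => hcross _ (pvGetLastD_mem_cons r.1 x) z hz
        have key : ∀ z ∈ r.2, p z = true → z ≠ r.1.getLastD x + 1 := by
          intro z hz hpz
          rcases pvTakeRun_stop p true xs x with h1 | ⟨h, t, h2, h3⟩
          · rw [← hr] at h1; rw [h1] at hz; simp at hz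
          · rw [← hr] at h2 h3
            rw [h2] at hz hgt hr2
            rcases List.mem_cons.mp hz with rfl | hzt
            · intro he; exact h3 ⟨he, hpz⟩
            · have hhz : h < z := (List.pairwise_cons.mp hr2).1 z hzt
              have hlh : r.1.getLastD x < h := hgt h (by simp)
              by_cases hhe : h = r.1.getLastD x + 1
              · have : ¬ p h = true := fun hp => h3 ⟨hhe, hp⟩
                omega
              · omega
        have hlen2 : r.2.length ≤ n := by
          have := pvTakeRun_len p true xs x
          rw [← hr] at this
          simp only [List.length_cons] at hlen
          omega
        have ihr := ih r.2 hlen2 hr2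
        have hfT : (x :: xs).filter p = (x :: r.1) ++ r.2.filter p := by
          rw [← hsplit, List.filter_cons_of_pos hpx, List.filter_append,
            List.filter_eq_self.mpr hmem, List.cons_append]
        have hfF : (x :: xs).filter (fun v => !(p v)) = r.2.filter (fun v => !(p v)) := by
          rw [← hsplit, List.filter_cons_of_neg (by simp [hpx]), List.filter_append,
            List.filter_eq_nil_iff.mpr (fun a ha => by simp [hmem a ha]), List.nil_append]
        have hhead : ∀ h ∈ (r.2.filter p).head?, h ≠ (pvTakeRun p true x xs).1.getLastD x + 1 := by
          intro h hh
          have hm := List.mem_of_mem_head? hh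
          have := List.mem_filter.mp hm
          rw [← hr]
          exact key h this.1 this.2
        have hRunsT : pvRunsC ((x :: r.1) ++ r.2.filter p) = (x :: r.1) :: pvRunsC (r.2.filter p) := by
          rw [List.cons_append]
          simp only [pvRunsC]
          rw [hr, pvTakeC_run_append p true xs x (r.2.filter p) hhead]
        have hRHS : pvRuns p (x :: xs) = (x :: r.1, true) :: pvRuns p r.2 := by
          simp only [pvRuns, hpx, hr]
        rw [hfT, hfF, hRunsT, hRHS]
        cases hf2 : r.2.filter (fun v => !(p v)) with
        | nil =>
          simp only [pvRunsC, pvMergeA]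
          rw [← ihr, hf2]
          simp [pvRunsC]
        | cons h' t' =>
          have hmem' : h' ∈ r.2 := (List.mem_filter.mp (hf2 ▸ List.mem_cons_self)).1
          have hxh : x < h' := hcross x (by simp) h' hmem'
          simp only [pvRunsC, pvMergeA]
          rw [if_pos (by simpa using hxh)]
          rw [← ihr, hf2]
          simp only [pvRunsC]
      | false =>
        set r := pvTakeRun p false x xs with hr
        have hsplit : r.1 ++ r.2 = xs := pvTakeRun_append p false xs x
        have hmem : ∀ z ∈ r.1, p z = false := fun z hz => pvTakeRun_mem p false xs x z hz
        have hS' : ((x :: r.1) ++ r.2).Pairwise (· < ·) := by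
          rw [List.cons_append, hsplit]; exact hS
        have hcross : ∀ a ∈ x :: r.1, ∀ z ∈ r.2, a < z := (List.pairwise_append.mp hS').2.2
        have hr2 : r.2.Pairwise (· < ·) := (List.pairwise_append.mp hS').2.1
        have hgt : ∀ z ∈ r.2, r.1.getLastD x < z :=
          fun z hz => hcross _ (pvGetLastD_mem_cons r.1 x) z hz
        have key : ∀ z ∈ r.2, p z = false → z ≠ r.1.getLastD x + 1 := by
          intro z hz hpz
          rcases pvTakeRun_stop p false xs x with h1 | ⟨h, t, h2, h3⟩
          · rw [← hr] at h1; rw [h1] at hz; simp at hz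
          · rw [← hr] at h2 h3
            rw [h2] at hz hgt hr2
            rcases List.mem_cons.mp hz with rfl | hzt
            · intro he; exact h3 ⟨he, hpz⟩
            · have hhz : h < z := (List.pairwise_cons.mp hr2).1 z hzt
              have hlh : r.1.getLastD x < h := hgt h (by simp)
              by_cases hhe : h = r.1.getLastD x + 1
              · have : ¬ p h = false := fun hp => h3 ⟨hhe, hp⟩
                omega
              · omega
        have hlen2 : r.2.length ≤ n := by
          have := pvTakeRun_len p false xs x
          rw [← hr] at this
          simp only [List.length_cons] at hlen
          omega
        have ihr := ih r.2 hlen2 hr2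
        have hfF : (x :: xs).filter (fun v => !(p v)) = (x :: r.1) ++ r.2.filter (fun v => !(p v)) := by
          rw [← hsplit, List.filter_cons_of_pos (by simp [hpx]), List.filter_append,
            List.filter_eq_self.mpr (fun a ha => by simp [hmem a ha]), List.cons_append]
        have hfT : (x :: xs).filter p = r.2.filter p := by
          rw [← hsplit, List.filter_cons_of_neg (by simp [hpx]), List.filter_append,
            List.filter_eq_nil_iff.mpr (fun a ha => by simp [hmem a ha]), List.nil_append]
        have hhead : ∀ h ∈ (r.2.filter (fun v => !(p v))).head?, h ≠ (pvTakeRun p false x xs).1.getLastD x + 1 := by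
          intro h hh
          have hm := List.mem_of_mem_head? hh
          have := List.mem_filter.mp hm
          rw [← hr]
          exact key h this.1 (by simpa using this.2)
        have hRunsF : pvRunsC ((x :: r.1) ++ r.2.filter (fun v => !(p v)))
            = (x :: r.1) :: pvRunsC (r.2.filter (fun v => !(p v))) := by
          rw [List.cons_append]
          simp only [pvRunsC]
          rw [hr, pvTakeC_run_append p false xs x (r.2.filter (fun v => !(p v))) hhead]
        have hRHS : pvRuns p (x :: xs) = (x :: r.1, false) :: pvRuns p r.2 := by
          simp only [pvRuns, hpx, hr]
        rw [hfT, hfF, hRunsF, hRHS]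
        cases hf2 : r.2.filter p with
        | nil =>
          simp only [pvRunsC, pvMergeA]
          rw [← ihr, hf2]
          simp [pvRunsC]
        | cons h' t' =>
          have hmem' : h' ∈ r.2 := (List.mem_filter.mp (hf2 ▸ List.mem_cons_self)).1
          have hxh : x < h' := hcross x (by simp) h' hmem'
          simp only [pvRunsC, pvMergeA]
          rw [if_neg (by simp; omega)]
          rw [← ihr, hf2]
          simp only [pvRunsC]

-- ===== VERDICT (by name: the statement is the Claim_ definition above) =====
theorem pvPairwiseLt (l : List Int) (h1 : l.Pairwise (· ≤ ·)) (h2 : l.Nodup) :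
    l.Pairwise (· < ·) :=
  (h1.and h2).imp (fun h => lt_of_le_of_ne h.1 h.2)

theorem find_ordered_sequences_with_status_spec : Claim_equal_find_ordered_sequences_with_status := by
  intro all_frames asd_output_frames _
  unfold Spec_find_ordered_sequences_with_status
  simp only [find_ordered_sequences_with_status, find_ordered_sequences_with_status_alt]
  rw [pvExtract_eq_runsC, pvExtract_eq_runsC, pvB_eq_runs]
  -- names
  have hUperm := PySem.List.sorted_perm (PySem.Set.union (PySem.Set.ofList all_frames) (PySem.Set.ofList asd_output_frames)) (fun x : Int => x) false
  have hUnodup : (PySem.List.sorted (PySem.Set.union (PySem.Set.ofList all_frames) (PySem.Set.ofList asd_output_frames)) (fun x : Int => x) false).Nodup :=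
    hUperm.nodup_iff.mpr (PySem.Set.nodup_union _ _ (PySem.Set.nodup_ofList _))
  have hUle := PySem.List.sorted_pairwise (PySem.Set.union (PySem.Set.ofList all_frames) (PySem.Set.ofList asd_output_frames)) (fun x : Int => x)
  have hUlt := pvPairwiseLt _ hUle hUnodup
  have hMperm := PySem.List.sorted_perm (PySem.Set.diff (PySem.Set.ofList all_frames) (PySem.Set.ofList asd_output_frames)) (fun x : Int => x) false
  have hMnodup : (PySem.List.sorted (PySem.Set.diff (PySem.Set.ofList all_frames) (PySem.Set.ofList asd_output_frames)) (fun x : Int => x) false).Nodup :=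
    hMperm.nodup_iff.mpr (PySem.Set.nodup_diff _ _ (PySem.Set.nodup_ofList _))
  have hMle := PySem.List.sorted_pairwise (PySem.Set.diff (PySem.Set.ofList all_frames) (PySem.Set.ofList asd_output_frames)) (fun x : Int => x)
  have hNperm := PySem.List.sorted_perm (PySem.Set.ofList asd_output_frames) (fun x : Int => x) false
  have hNnodup : (PySem.List.sorted (PySem.Set.ofList asd_output_frames) (fun x : Int => x) false).Nodup :=
    hNperm.nodup_iff.mpr (PySem.Set.nodup_ofList _)
  have hNle := PySem.List.sorted_pairwise (PySem.Set.ofList asd_output_frames) (fun x : Int => x)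
  have hM : PySem.List.sorted (PySem.Set.diff (PySem.Set.ofList all_frames) (PySem.Set.ofList asd_output_frames)) (fun x : Int => x) false
      = (PySem.List.sorted (PySem.Set.union (PySem.Set.ofList all_frames) (PySem.Set.ofList asd_output_frames)) (fun x : Int => x) false).filter
          (fun v => !(PySem.Set.contains (PySem.Set.ofList asd_output_frames) v)) := by
    refine PySem.List.eq_of_perm_of_pairwise_le_of_injective (fun x : Int => x) (fun a b h => h) ?_ hMle (hUle.filter _)
    refine (List.perm_ext_iff_of_nodup hMnodup (hUnodup.filter _)).mpr ?_
    intro v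
    have hc : (!(PySem.Set.ofList asd_output_frames).contains v) = true ↔ v ∉ asd_output_frames := by
      simp [PySem.Set.mem_ofList]
    simp only [PySem.List.mem_sorted, PySem.Set.mem_diff, PySem.Set.mem_ofList, List.mem_filter,
      PySem.Set.mem_union, hc]
    tauto
  have hN : PySem.List.sorted (PySem.Set.ofList asd_output_frames) (fun x : Int => x) false
      = (PySem.List.sorted (PySem.Set.union (PySem.Set.ofList all_frames) (PySem.Set.ofList asd_output_frames)) (fun x : Int => x) false).filter
          (fun v => PySem.Set.contains (PySem.Set.ofList asd_output_frames) v) := by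
    refine PySem.List.eq_of_perm_of_pairwise_le_of_injective (fun x : Int => x) (fun a b h => h) ?_ hNle (hUle.filter _)
    refine (List.perm_ext_iff_of_nodup hNnodup (hUnodup.filter _)).mpr ?_
    intro v
    have hc : (PySem.Set.ofList asd_output_frames).contains v = true ↔ v ∈ asd_output_frames := by
      simp [PySem.Set.mem_ofList]
    simp only [PySem.List.mem_sorted, PySem.Set.mem_ofList, List.mem_filter, PySem.Set.mem_union, hc]
    tauto
  rw [hM, hN]
  exact pvMerge_eq_runs (fun v => PySem.Set.contains (PySem.Set.ofList asd_output_frames) v) _ hUlt
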